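-- pv_equiv track=rewrite | github.com/JaraVictoria/SSL | todojunto_lexeryparser.py | automata_parentesisCerrar
-- ===== SOURCE A (Python) =====
-- def automata_parentesisCerrar(cadena):
-- 	estado = 0
-- 	estados_finales = [1]
--
-- 	for caracter in cadena:
-- 		if estado == 0 and caracter == ")":
-- 			estado = 1
-- 		else:
-- 			estado = -1
-- 			break
--
-- 	if estado == -1:
-- 		return ESTADO_TRAMPA
-- 	if estado in estados_finales:
-- 		return ESTADO_FINAL
-- 	else:
-- 		return ESTADO_NO_FINAL
--
-- ESTADO_FINAL = "ESTADO ACEPTADO"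
--
-- ESTADO_NO_FINAL = "ESTADO NO ACEPTADO"
--
-- ESTADO_TRAMPA = "ESTADO TRAMPA"
-- ===== SOURCE B (Python) =====
-- def automata_parentesisCerrar(cadena):
--     chars = list(cadena)
--     if not chars:
--         return ESTADO_NO_FINAL
--     if len(chars) == 1 and chars[0] == ")":
--         return ESTADO_FINAL
--     return ESTADO_TRAMPA
--
-- ESTADO_FINAL = "ESTADO ACEPTADO"
--
-- ESTADO_NO_FINAL = "ESTADO NO ACEPTADO"
--
-- ESTADO_TRAMPA = "ESTADO TRAMPA"
-- ===== Notes on version B (the rewrite author's own statement) =====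
-- stated objective: simpler
-- what changed: Replaced the DFA state-loop with a direct closed-form case analysis on the materialized character list (empty / single ')' / anything else).
import Mathlib
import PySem

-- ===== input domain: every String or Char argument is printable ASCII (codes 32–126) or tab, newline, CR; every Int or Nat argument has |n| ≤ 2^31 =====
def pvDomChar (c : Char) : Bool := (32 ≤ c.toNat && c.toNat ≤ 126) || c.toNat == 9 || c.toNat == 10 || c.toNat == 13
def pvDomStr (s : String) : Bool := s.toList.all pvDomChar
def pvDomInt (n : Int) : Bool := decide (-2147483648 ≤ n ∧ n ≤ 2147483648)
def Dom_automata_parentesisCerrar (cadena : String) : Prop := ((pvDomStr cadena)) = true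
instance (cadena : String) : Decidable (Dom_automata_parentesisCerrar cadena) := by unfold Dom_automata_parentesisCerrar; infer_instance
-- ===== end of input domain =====

-- B replaces A's DFA state-loop with a direct case analysis on the character list (simpler).

-- ===== PORT A =====
-- the for-loop with break: returns the final 'estado'
def pvLoopA : List Char → Int → Int
  | [], estado => estado
  | c :: rest, estado =>
      if estado = 0 ∧ c = ')' then pvLoopA rest 1
      else (-1 : Int)   -- estado = -1; break

def automata_parentesisCerrar (cadena : String) : String :=
  let estado := pvLoopA cadena.toList 0
  if estado = -1 then "ESTADO TRAMPA"
  else if estado = 1 then "ESTADO ACEPTADO"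
  else "ESTADO NO ACEPTADO"

-- ===== PORT B =====
def automata_parentesisCerrar_alt (cadena : String) : String :=
  match cadena.toList with
  | [] => "ESTADO NO ACEPTADO"
  | [c] => if c = ')' then "ESTADO ACEPTADO" else "ESTADO TRAMPA"
  | _ => "ESTADO TRAMPA"

-- ===== PRECONDITION & SPEC =====
def Spec_automata_parentesisCerrar (cadena : String) (out : String) : Prop := out = automata_parentesisCerrar_alt cadena
instance (cadena : String) (out : String) : Decidable (Spec_automata_parentesisCerrar cadena out) := by unfold Spec_automata_parentesisCerrar; infer_instance

-- ===== CLAIM (what is proved, stated in full; the proofs are below) =====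
def Claim_equal_automata_parentesisCerrar : Prop := ∀ (cadena : String), Dom_automata_parentesisCerrar cadena → Spec_automata_parentesisCerrar cadena (automata_parentesisCerrar cadena)

-- ===== LEMMAS AND PROOFS =====

-- ===== VERDICT (by name: the statement is the Claim_ definition above) =====
theorem automata_parentesisCerrar_spec : Claim_equal_automata_parentesisCerrar := by
  intro cadena _
  unfold Spec_automata_parentesisCerrar automata_parentesisCerrar automata_parentesisCerrar_alt
  match h : cadena.toList with
  | [] => simp [pvLoopA]
  | [c] => by_cases hc : c = ')' <;> simp [pvLoopA, hc]
  | c :: d :: rest =>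
      by_cases hc : c = ')' <;> simp [pvLoopA, hc]
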